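-- pv_equiv track=rewrite | github.com/ligato/vpp-agent | tests/robot/libraries/vat_term.py | Convert_ETCD_Dump_To_JSON
-- ===== SOURCE A (Python) =====
-- def Convert_ETCD_Dump_To_JSON(dump):
--     etcd_json = '['
--     key = ''
--     data = ''
--     firstline = True
--     for line in dump.splitlines():
--         if line.strip() != '':
--             if line[0] == '/':
--                 if not firstline:
--                     etcd_json += '{"key":"'+key+'","node":"'+node+'","name":"'+name+'","type":"'+type+'","data":'+data+'},'
--                 key = line
--                 node = key.split('/')[2]
--                 name = key.split('/')[-1]
--                 type = key.split('/')[4]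
--                 data = ''
--                 firstline = False
--             else:
--                 data += line
--     if not firstline:
--         etcd_json += '{"key":"'+key+'","node":"'+node+'","name":"'+name+'","type":"'+type+'","data":'+data+'}'
--     etcd_json += ']'
--     return etcd_json
-- ===== SOURCE B (Python) =====
-- def Convert_ETCD_Dump_To_JSON(dump):
--     records = []
--     for line in dump.splitlines():
--         if line.strip() == '':
--             continue
--         if line.startswith('/'):
--             parts = line.split('/')
--             records.append([line, parts[2], parts[-1], parts[4], ''])
--         elif records:
--             records[-1][4] += line
--     return '[' + ','.join(
--         '{"key":"' + k + '","node":"' + n + '","name":"' + m + '","type":"' + t + '","data":' + d + '}'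
--         for k, n, m, t, d in records) + ']'
-- ===== Notes on version B (the rewrite author's own statement) =====
-- stated objective: simpler
-- what changed: A's single stateful loop (firstline flag, running output string, manual trailing-comma emission) is replaced by a two-pass decomposition: first build a list of records (key/node/name/type/accumulated data), then format each record and ','.join them.
import Mathlib
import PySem

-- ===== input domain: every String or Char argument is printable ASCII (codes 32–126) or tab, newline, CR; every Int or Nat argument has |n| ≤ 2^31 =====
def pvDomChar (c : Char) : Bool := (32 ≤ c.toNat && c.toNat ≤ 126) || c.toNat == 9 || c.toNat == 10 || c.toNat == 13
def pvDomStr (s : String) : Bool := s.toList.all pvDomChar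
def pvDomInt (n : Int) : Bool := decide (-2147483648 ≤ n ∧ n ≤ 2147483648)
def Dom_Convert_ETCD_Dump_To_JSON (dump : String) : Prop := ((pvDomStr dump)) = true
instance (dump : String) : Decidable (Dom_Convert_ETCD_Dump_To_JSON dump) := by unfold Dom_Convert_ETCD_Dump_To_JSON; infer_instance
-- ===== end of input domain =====

-- B replaces A's single stateful loop (firstline flag, running string with manual
-- trailing-comma handling) by a two-pass record-list build followed by a join; objective: simpler.

-- ===== PORT A =====
-- A's loop state: etcd_json, key, node, name, type, data, firstline.
structure PvStA where
  json : String
  key : String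
  node : String
  name : String
  ty : String
  data : String
  first : Bool
deriving Repr, DecidableEq

-- the record string A appends (the same expression appears twice in A's source)
def pvEmitA (s : PvStA) : String :=
  "{\"key\":\"" ++ s.key ++ "\",\"node\":\"" ++ s.node ++ "\",\"name\":\"" ++ s.name
    ++ "\",\"type\":\"" ++ s.ty ++ "\",\"data\":" ++ s.data ++ "}"

-- one iteration of A's for-loop.  key.split('/')[i] raises IndexError when absent in
-- Python (excluded by Pre_); here `.getD ""` stands in on those excluded inputs.
def pvStepA (s : PvStA) (line : String) : PvStA :=
  if PySem.Str.strip line ≠ "" then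
    if PySem.Str.pyGet? line 0 == some '/' then
      let json := if !s.first then s.json ++ pvEmitA s ++ "," else s.json
      let parts := (PySem.Str.split? line "/").getD []
      { json := json, key := line,
        node := (PySem.List.pyGet? parts 2).getD "",
        name := (PySem.List.pyGet? parts (-1)).getD "",
        ty := (PySem.List.pyGet? parts 4).getD "",
        data := "", first := false }
    else
      { s with data := s.data ++ line }
  else s

def Convert_ETCD_Dump_To_JSON (dump : String) : String :=
  let s := (PySem.Str.splitlines dump).foldl pvStepA ⟨"[", "", "", "", "", "", true⟩
  (if !s.first then s.json ++ pvEmitA s else s.json) ++ "]"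

-- ===== PORT B =====
-- a parsed record: key, node, name, type, accumulated data
structure PvRec where
  key : String
  node : String
  name : String
  ty : String
  data : String
deriving Repr, DecidableEq

-- records[-1][4] += line
def pvAppendLast : List PvRec → String → List PvRec
  | [], _ => []
  | [r], line => [{ r with data := r.data ++ line }]
  | r :: rs, line => r :: pvAppendLast rs line

-- one iteration of B's record-building loop
def pvStepB (recs : List PvRec) (line : String) : List PvRec :=
  if PySem.Str.strip line == "" then recs
  else if PySem.Str.startswith line "/" then
    let parts := (PySem.Str.split? line "/").getD []
    recs ++ [⟨line, (PySem.List.pyGet? parts 2).getD "",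
                    (PySem.List.pyGet? parts (-1)).getD "",
                    (PySem.List.pyGet? parts 4).getD "", ""⟩]
  else if recs.isEmpty then recs
  else pvAppendLast recs line

-- the formatting pass
def pvFmt (r : PvRec) : String :=
  "{\"key\":\"" ++ r.key ++ "\",\"node\":\"" ++ r.node ++ "\",\"name\":\"" ++ r.name
    ++ "\",\"type\":\"" ++ r.ty ++ "\",\"data\":" ++ r.data ++ "}"

def Convert_ETCD_Dump_To_JSON_alt (dump : String) : String :=
  "[" ++ PySem.Str.join "," (((PySem.Str.splitlines dump).foldl pvStepB []).map pvFmt) ++ "]"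

-- ===== PRECONDITION & SPEC =====
-- Pre_ excludes exactly the dumps on which Python A raises IndexError: a nonblank line
-- starting with '/' whose split('/') has fewer than 5 pieces (key.split('/')[4] / [2]).
def Pre_Convert_ETCD_Dump_To_JSON (dump : String) : Prop :=
  ∀ line ∈ PySem.Str.splitlines dump,
    PySem.Str.strip line ≠ "" → PySem.Str.startswith line "/" = true →
      5 ≤ ((PySem.Str.split? line "/").getD []).length
instance (dump : String) : Decidable (Pre_Convert_ETCD_Dump_To_JSON dump) := by
  unfold Pre_Convert_ETCD_Dump_To_JSON; infer_instance

def pvWitness_Convert_ETCD_Dump_To_JSON : String :=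
  "/vnf-agent/node1/vpp/interface/if1\n{\"x\":1}\n\n/vnf-agent/node2/vpp/bd/bd1"

def Spec_Convert_ETCD_Dump_To_JSON (dump : String) (out : String) : Prop :=
  out = Convert_ETCD_Dump_To_JSON_alt dump
instance (dump : String) (out : String) : Decidable (Spec_Convert_ETCD_Dump_To_JSON dump out) := by
  unfold Spec_Convert_ETCD_Dump_To_JSON; infer_instance

-- ===== CLAIM (what is proved, stated in full; the proofs are below) =====
def Claim_equal_Convert_ETCD_Dump_To_JSON : Prop :=
  ∀ (dump : String), Dom_Convert_ETCD_Dump_To_JSON dump →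
    Pre_Convert_ETCD_Dump_To_JSON dump →
      Spec_Convert_ETCD_Dump_To_JSON dump (Convert_ETCD_Dump_To_JSON dump)

-- ===== LEMMAS AND PROOFS =====

-- "s ++ "," ++ (s' ++ "," ++ (… ++ ","))" — the comma-terminated chain of strings
def pvChainStr : List String → String
  | [] => ""
  | s :: l => s ++ "," ++ pvChainStr l

-- A's state determined by B's record list
def pvInv (s : PvStA) (recs : List PvRec) : Prop :=
  match recs.getLast? with
  | none => s.first = true ∧ s.json = "["
  | some r => s = ⟨"[" ++ pvChainStr (recs.dropLast.map pvFmt), r.key, r.node, r.name, r.ty, r.data, false⟩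

theorem pv_cond_eq (l : List Char) :
    (PySem.List.pyGet? l 0 = some '/') ↔ PySem.Chars.startswith l ['/'] = true := by
  rw [PySem.Chars.startswith_iff]
  cases l with
  | nil => simp [PySem.List.pyGet?]
  | cons c cs => simp [PySem.List.pyGet?, PySem.List.pyIdx?, List.cons_prefix_cons, eq_comm]

theorem pvChainStr_append (l : List String) (x : String) :
    pvChainStr (l ++ [x]) = pvChainStr l ++ (x ++ ",") := by
  induction l with
  | nil => simp [pvChainStr]
  | cons s l ih => simp [pvChainStr, ih, String.append_assoc]

theorem pvAppendLast_concat (rs : List PvRec) (r : PvRec) (line : String) :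
    pvAppendLast (rs ++ [r]) line = rs ++ [{ r with data := r.data ++ line }] := by
  induction rs with
  | nil => simp [pvAppendLast]
  | cons a rs ih =>
    cases rs with
    | nil => simp [pvAppendLast]
    | cons b rs => simpa [pvAppendLast] using ih

theorem pv_join_concat (l : List String) (x : String) :
    pvChainStr l ++ x = PySem.Str.join "," (l ++ [x]) := by
  induction l with
  | nil =>
    have h1 : (PySem.Str.join "," [x]).toList = x.toList := by
      simp [PySem.Str.toList_join, PySem.Chars.join_singleton]
    simp [pvChainStr]
    exact (String.toList_injective h1).symm
  | cons s l ih =>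
    have h2 : PySem.Str.join "," (s :: (l ++ [x])) = s ++ "," ++ PySem.Str.join "," (l ++ [x]) := by
      apply String.toList_injective
      cases l with
      | nil => simp [PySem.Str.toList_join, PySem.Chars.join_cons_cons, PySem.Chars.join_singleton]
      | cons a l => simp [PySem.Str.toList_join, PySem.Chars.join_cons_cons]
    simp [pvChainStr, h2, ← ih, String.append_assoc]

theorem pv_step (s : PvStA) (recs : List PvRec) (line : String) (h : pvInv s recs) :
    pvInv (pvStepA s line) (pvStepB recs line) := by
  by_cases hb : PySem.Str.strip line = ""
  · simpa [pvStepA, pvStepB, hb] using h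
  · by_cases hsw : PySem.Chars.startswith line.toList ['/'] = true
    · rcases List.eq_nil_or_concat recs with rfl | ⟨rs, r, rfl⟩
      · obtain ⟨h1, h2⟩ : s.first = true ∧ s.json = "[" := by simpa [pvInv] using h
        simp [pvStepA, pvStepB, hb, hsw, pv_cond_eq, pvInv, pvChainStr, h1, h2]
      · have hseq : s = ⟨"[" ++ pvChainStr (rs.map pvFmt), r.key, r.node, r.name, r.ty, r.data, false⟩ := by
          simpa [pvInv, List.getLast?_concat, List.dropLast_concat] using h
        subst hseq
        simp [pvStepA, pvStepB, hb, hsw, pv_cond_eq, pvInv,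
          pvChainStr_append, pvEmitA, pvFmt, String.append_assoc]
    · rcases List.eq_nil_or_concat recs with rfl | ⟨rs, r, rfl⟩
      · obtain ⟨h1, h2⟩ : s.first = true ∧ s.json = "[" := by simpa [pvInv] using h
        simp [pvStepA, pvStepB, hb, hsw, pv_cond_eq, pvInv, h1, h2]
      · have hseq : s = ⟨"[" ++ pvChainStr (rs.map pvFmt), r.key, r.node, r.name, r.ty, r.data, false⟩ := by
          simpa [pvInv, List.getLast?_concat, List.dropLast_concat] using h
        subst hseq
        simp [pvStepA, pvStepB, hb, hsw, pv_cond_eq, pvInv, pvAppendLast_concat]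

theorem pv_fold (l : List String) (s : PvStA) (recs : List PvRec) (h : pvInv s recs) :
    pvInv (l.foldl pvStepA s) (l.foldl pvStepB recs) := by
  induction l generalizing s recs with
  | nil => exact h
  | cons a l ih => exact ih _ _ (pv_step _ _ _ h)

-- ===== VERDICT (by name: the statement is the Claim_ definition above) =====
theorem Convert_ETCD_Dump_To_JSON_spec : Claim_equal_Convert_ETCD_Dump_To_JSON := by
  intro dump _ _
  unfold Spec_Convert_ETCD_Dump_To_JSON Convert_ETCD_Dump_To_JSON Convert_ETCD_Dump_To_JSON_alt
  have h := pv_fold (PySem.Str.splitlines dump) ⟨"[", "", "", "", "", "", true⟩ [] (by simp [pvInv])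
  rcases List.eq_nil_or_concat ((PySem.Str.splitlines dump).foldl pvStepB []) with he | ⟨rs, r, he⟩
  · rw [he] at h
    simp only [pvInv, List.getLast?_nil] at h
    obtain ⟨h1, h2⟩ := h
    have hj : PySem.Str.join "," ([] : List String) = "" :=
      String.toList_injective (by simp [PySem.Str.toList_join, PySem.Chars.join_nil])
    simp [he, h1, h2, hj]
  · rw [he] at h
    have hseq : (PySem.Str.splitlines dump).foldl pvStepA ⟨"[", "", "", "", "", "", true⟩
        = ⟨"[" ++ pvChainStr (rs.map pvFmt), r.key, r.node, r.name, r.ty, r.data, false⟩ := by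
      simpa [pvInv, List.getLast?_concat, List.dropLast_concat] using h
    rw [he, hseq]
    simp [pvEmitA, pvFmt, ← pv_join_concat, String.append_assoc]
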